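-- pv_equiv track=rewrite | github.com/Conquerk/test | python/day15/zuoye/2.py | myxrange
-- ===== SOURCE A (Python) =====
-- def myxrange(start,stop=None,step=1):
--     if stop is None:
--         stop = start
--         start=0
--     #正向生成
--     if step>0:
--         while start < stop:
--             yield start
--             start+=step
--     elif step>0:
--         while start > stop:
--             yield start
--             start += step
-- ===== SOURCE B (Python) =====
-- def myxrange(start, stop=None, step=1):
--     if stop is None:
--         start, stop = 0, start
--     if step > 0:
--         n = -((start - stop) // step)  # = ceil((stop - start) / step)
--         for i in range(n):
--             yield start + i * step
-- ===== Notes on version B (the rewrite author's own statement) =====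
-- stated objective: alternative
-- what changed: Replaced A's while-loop that repeatedly adds step until reaching stop by a closed-form element count n = -((start-stop)//step) followed by direct indexing start + i*step over range(n); A's dead elif branch (step>0 twice, so negative steps yield nothing) is preserved by the step>0 guard.
import Mathlib
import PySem

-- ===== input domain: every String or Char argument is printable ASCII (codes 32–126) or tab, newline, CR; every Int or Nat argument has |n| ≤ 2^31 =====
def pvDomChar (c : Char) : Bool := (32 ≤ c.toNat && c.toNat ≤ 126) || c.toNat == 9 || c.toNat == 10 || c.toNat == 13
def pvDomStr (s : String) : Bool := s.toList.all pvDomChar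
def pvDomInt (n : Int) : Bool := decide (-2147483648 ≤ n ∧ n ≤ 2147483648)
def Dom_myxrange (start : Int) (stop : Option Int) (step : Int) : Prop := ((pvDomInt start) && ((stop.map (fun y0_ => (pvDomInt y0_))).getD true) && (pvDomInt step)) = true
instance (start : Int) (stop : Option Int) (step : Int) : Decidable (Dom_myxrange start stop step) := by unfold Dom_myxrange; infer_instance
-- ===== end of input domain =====

-- A generates by a while-loop adding step; B computes the element count in closed form and indexes.
-- Note: A is a Python generator; equivalence is about the produced sequence of values (as a list).

-- ===== PORT A =====
-- while start < stop: yield start; start += step   (only reached when step > 0)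
def myxrangeGo (stop step : Int) (hs : 0 < step) (start : Int) : List Int :=
  if _h : start < stop then start :: myxrangeGo stop step hs (start + step) else []
termination_by (stop - start).toNat
decreasing_by omega

def myxrange (start : Int) (stop : Option Int) (step : Int) : List Int :=
  -- 'if stop is None: stop = start; start = 0'
  let p : Int × Int := match stop with
    | none => (0, start)
    | some s => (start, s)
  if hstep : 0 < step then
    myxrangeGo p.2 step hstep p.1
  else
    -- A's 'elif step > 0' branch is unreachable: the generator yields nothing
    []

-- ===== PORT B =====
def myxrange_alt (start : Int) (stop : Option Int) (step : Int) : List Int :=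
  let p : Int × Int := match stop with
    | none => (0, start)
    | some s => (start, s)
  if 0 < step then
    let n : Int := -(PySem.Int.floordiv (p.1 - p.2) step)
    (PySem.List.pyRange 0 n 1).map (fun i => p.1 + i * step)
  else
    []

-- ===== PRECONDITION & SPEC =====
def Spec_myxrange (start : Int) (stop : Option Int) (step : Int) (out : List Int) : Prop := out = myxrange_alt start stop step
instance (start : Int) (stop : Option Int) (step : Int) (out : List Int) : Decidable (Spec_myxrange start stop step out) := by unfold Spec_myxrange; infer_instance

-- ===== CLAIM (what is proved, stated in full; the proofs are below) =====
def Claim_equal_myxrange : Prop := ∀ (start : Int) (stop : Option Int) (step : Int), Dom_myxrange start stop step → Spec_myxrange start stop step (myxrange start stop step)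

-- ===== LEMMAS AND PROOFS =====

theorem myxrangeGo_eq (step : Int) (hs : 0 < step) :
    ∀ (n : Nat) (st sp : Int), -(PySem.Int.floordiv (st - sp) step) = (n : Int) →
      myxrangeGo sp step hs st = (List.range n).map (fun k : Nat => st + (k : Int) * step) := by
  intro n
  induction n with
  | zero =>
    intro st sp h
    rw [PySem.Int.floordiv_eq_ediv_of_pos hs] at h
    push_cast at h
    have h1 := Int.ediv_add_emod (st - sp) step
    have h2 := Int.emod_nonneg (st - sp) (ne_of_gt hs)
    have h3 := Int.emod_lt_of_pos (st - sp) hs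
    have : ¬ st < sp := by
      have hq : (st - sp) / step = 0 := by omega
      rw [hq, mul_zero, zero_add] at h1
      omega
    rw [myxrangeGo]
    simp [this]
  | succ m ih =>
    intro st sp h
    rw [PySem.Int.floordiv_eq_ediv_of_pos hs] at h
    push_cast at h
    have hlt : st < sp := by
      by_contra hge
      have : 0 ≤ (st - sp) / step := Int.ediv_nonneg (by omega) (le_of_lt hs)
      omega
    have hnext : -(PySem.Int.floordiv (st + step - sp) step) = (m : Int) := by
      rw [PySem.Int.floordiv_eq_ediv_of_pos hs]
      have he : st + step - sp = (st - sp) + 1 * step := by ring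
      rw [he, Int.add_mul_ediv_right _ _ (by omega)]
      omega
    rw [myxrangeGo]
    simp only [hlt, dif_pos]
    rw [ih (st + step) sp hnext, List.range_succ_eq_map, List.map_cons, List.map_map]
    refine congrArg₂ _ (by push_cast; ring) ?_
    apply List.map_congr_left
    intro k _
    simp only [Function.comp_apply]
    push_cast
    ring

theorem myxrange_eq_alt (start : Int) (stop : Option Int) (step : Int) :
    myxrange start stop step = myxrange_alt start stop step := by
  unfold myxrange myxrange_alt
  set p : Int × Int := (match stop with
    | none => (0, start)
    | some s => (start, s)) with hp
  by_cases hs : 0 < step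
  · simp only [hs, dif_pos, if_pos]
    set n : Int := -(PySem.Int.floordiv (p.1 - p.2) step) with hn
    by_cases hn0 : 0 ≤ n
    · rw [myxrangeGo_eq step hs n.toNat p.1 p.2 (by omega), PySem.List.pyRange_one]
      simp [Function.comp_def]
    · -- n < 0 : start ≥ stop, both sides empty
      have hfd : PySem.Int.floordiv (p.1 - p.2) step = (p.1 - p.2) / step :=
        PySem.Int.floordiv_eq_ediv_of_pos hs
      have h1 := Int.ediv_add_emod (p.1 - p.2) step
      have h2 := Int.emod_nonneg (p.1 - p.2) (ne_of_gt hs)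
      have h3 := Int.emod_lt_of_pos (p.1 - p.2) hs
      have h4 : step * 1 ≤ step * ((p.1 - p.2) / step) := by
        apply mul_le_mul_of_nonneg_left (by omega) (le_of_lt hs)
      have hge : ¬ p.1 < p.2 := by omega
      have hr : PySem.List.pyRange 0 n 1 = [] := by
        rw [PySem.List.pyRange_one, Int.toNat_of_nonpos (by omega : n - 0 ≤ 0)]
        simp
      rw [hr, myxrangeGo]
      simp [hge]
  · simp [hs]

-- ===== VERDICT (by name: the statement is the Claim_ definition above) =====
theorem myxrange_spec : Claim_equal_myxrange := by
  intro start stop step _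
  exact myxrange_eq_alt start stop step
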